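-- pv_equiv track=rewrite | github.com/AnthonyOfSeattle/Phosphopedia | rules/scripts/integration_engine.py | get_peptide_ranges
-- ===== SOURCE A (Python) =====
-- def get_peptide_ranges(peptides, seq):
--     peptide_ranges = []
--     for upep in peptides:
--         start = seq.find(upep)
--         while start >= 0:
--             peptide_ranges.append((start, start + len(upep)))
--             start = seq.find(upep, start + 1)
--     return sorted(peptide_ranges)
-- ===== SOURCE B (Python) =====
-- def get_peptide_ranges(peptides, seq):
--     matches = []
--     for i in range(len(seq) + 1):
--         suffix = seq[i:]
--         for pep in peptides:
--             if suffix.startswith(pep):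
--                 matches.append((i, i + len(pep)))
--     return sorted(matches)
-- ===== Notes on version B (the rewrite author's own statement) =====
-- stated objective: alternative
-- what changed: B makes a single position-major pass over the sequence, testing every peptide as a prefix of the suffix at each position, instead of A's peptide-major repeated str.find scan loop.
import Mathlib
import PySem

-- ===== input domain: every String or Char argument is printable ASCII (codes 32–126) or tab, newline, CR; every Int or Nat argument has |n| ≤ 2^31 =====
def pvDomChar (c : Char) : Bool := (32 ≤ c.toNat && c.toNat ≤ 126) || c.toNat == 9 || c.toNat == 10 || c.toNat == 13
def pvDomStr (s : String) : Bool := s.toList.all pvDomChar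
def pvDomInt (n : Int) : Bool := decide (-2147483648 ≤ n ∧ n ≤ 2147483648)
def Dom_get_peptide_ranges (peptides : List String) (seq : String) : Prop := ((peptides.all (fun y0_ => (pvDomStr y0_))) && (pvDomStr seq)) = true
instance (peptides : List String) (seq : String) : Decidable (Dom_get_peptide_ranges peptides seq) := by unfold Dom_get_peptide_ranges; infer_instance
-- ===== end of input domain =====

-- B replaces A's peptide-major repeated str.find scan loop by one position-major pass
-- testing each peptide as a prefix of every suffix (objective: alternative, same result).

-- ===== PORT A =====
-- the 'while start >= 0' loop; fuel bounds the iteration count (start strictly increases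
-- below len(seq)+1 each round), the computation is Python's step for step
def pvLoopA (s p : List Char) : Nat → Int → List (List Int)
  | 0, _ => []
  | fuel+1, start =>
    if 0 ≤ start then
      [start, start + (p.length : Int)] :: pvLoopA s p fuel (PySem.Chars.findFrom s p (start + 1) none)
    else []

def get_peptide_ranges (peptides : List String) (seq : String) : List (List Int) :=
  let s := seq.toList
  let peptide_ranges := peptides.foldl (fun acc upep =>
    acc ++ pvLoopA s upep.toList (s.length + 2) (PySem.Chars.find s upep.toList)) []
  PySem.List.sorted peptide_ranges (fun x => x) false

-- ===== PORT B =====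
def get_peptide_ranges_alt (peptides : List String) (seq : String) : List (List Int) :=
  let s := seq.toList
  let ms := (PySem.List.pyRange 0 ((s.length : Int) + 1) 1).foldl (fun acc i =>
    let suffix := PySem.Chars.slice s (some i) none
    peptides.foldl (fun acc2 pep =>
      if PySem.Chars.startswith suffix pep.toList then acc2 ++ [[i, i + (pep.toList.length : Int)]]
      else acc2) acc) []
  PySem.List.sorted ms (fun x => x) false

-- ===== PRECONDITION & SPEC =====
def Spec_get_peptide_ranges (peptides : List String) (seq : String) (out : List (List Int)) : Prop := out = get_peptide_ranges_alt peptides seq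
instance (peptides : List String) (seq : String) (out : List (List Int)) : Decidable (Spec_get_peptide_ranges peptides seq out) := by unfold Spec_get_peptide_ranges; infer_instance

-- ===== CLAIM (what is proved, stated in full; the proofs are below) =====
def Claim_equal_get_peptide_ranges : Prop := ∀ (peptides : List String) (seq : String), Dom_get_peptide_ranges peptides seq → Spec_get_peptide_ranges peptides seq (get_peptide_ranges peptides seq)

-- ===== LEMMAS AND PROOFS =====

-- the occurrence ranges of p in s at positions ≥ j, in increasing position order
def pvOcc (s p : List Char) (j : Nat) : List (List Int) :=
  ((List.range' j (s.length + 1 - j)).filter (fun i => decide (p <+: s.drop i))).map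
    (fun (i : Nat) => ([(i : Int), (i : Int) + (p.length : Int)] : List Int))

theorem pvFindFrom_past (s p : List Char) (j : Nat) (h : s.length < j) :
    PySem.Chars.findFrom s p (j : Int) none = -1 := by
  simp only [PySem.Chars.findFrom]
  have h1 : ¬ ((j : Int) < 0) := by omega
  have h2 : (s.length : Int) < (j : Int) := by exact_mod_cast h
  simp [h1, h2]

theorem pvFindFrom_le (s p : List Char) (j : Nat) (hj : j ≤ s.length) :
    PySem.Chars.findFrom s p (j : Int) none ≤ (s.length : Int) := by
  simp only [PySem.Chars.findFrom]
  have h1 : ¬((j : Int) < 0) := by omega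
  have h2 := PySem.Chars.find_le_length (List.drop (Int.toNat (j:Int)) (List.take (Int.toNat ((s.length : Nat) : Int)) s)) p
  have h3 := PySem.Chars.neg_one_le_find (List.drop (Int.toNat (j:Int)) (List.take (Int.toNat ((s.length : Nat) : Int)) s)) p
  simp only [h1, if_false]
  split_ifs with c1 c2 <;> try omega
  · simp at h2 h3 ⊢; omega

theorem pvPrefix_drop_infix (s p : List Char) (i j : Nat) (hji : j ≤ i) (h : p <+: s.drop i) :
    p <:+: s.drop j := by
  have hd : List.drop i s = (List.drop j s).drop (i - j) := by
    rw [List.drop_drop]; congr 1; omega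
  rw [hd] at h
  exact List.IsInfix.trans h.isInfix (List.drop_suffix _ _).isInfix

theorem pvLoopA_eq (s p : List Char) :
    ∀ (fuel j : Nat), s.length + 1 - j ≤ fuel →
      pvLoopA s p fuel (PySem.Chars.findFrom s p (j : Int) none) = pvOcc s p j := by
  intro fuel
  induction fuel with
  | zero =>
    intro j h
    have h0 : s.length + 1 - j = 0 := by omega
    simp [pvLoopA, pvOcc, h0]
  | succ fuel ih =>
    intro j h
    by_cases hj : j ≤ s.length
    · by_cases hneg : PySem.Chars.findFrom s p (j : Int) none = -1
      · have hno : ¬ p <:+: s.drop j := (PySem.Chars.findFrom_natCast_eq_neg_one_iff s p j hj).mp hneg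
        rw [hneg]
        have hfil : (List.range' j (s.length + 1 - j)).filter (fun i => decide (p <+: s.drop i)) = [] := by
          rw [List.filter_eq_nil_iff]
          intro i hi
          simp only [decide_eq_true_eq]
          intro hpre
          exact hno (pvPrefix_drop_infix s p i j (List.mem_range'_1.mp hi).1 hpre)
        simp [pvLoopA, pvOcc, hfil]
      · obtain ⟨hge, hpre, hmin⟩ := PySem.Chars.findFrom_natCast_spec s p j hj hneg
        set r := PySem.Chars.findFrom s p (j : Int) none with hr
        have hr0 : 0 ≤ r := by omega
        have hrm : r = ((r.toNat : Nat) : Int) := (Int.toNat_of_nonneg hr0).symm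
        set m := r.toNat with hm
        have hjm : j ≤ m := by omega
        have hmle : m ≤ s.length := by
          have := pvFindFrom_le s p j hj
          omega
        have hnext : r + 1 = ((m + 1 : Nat) : Int) := by omega
        have hrec : pvLoopA s p fuel (PySem.Chars.findFrom s p ((m + 1 : Nat) : Int) none) = pvOcc s p (m + 1) :=
          ih (m + 1) (by omega)
        have hsplit : List.range' j (s.length + 1 - j)
            = List.range' j (m - j) ++ m :: List.range' (m + 1) (s.length - m) := by
          have e1 : List.range' j (m - j) ++ List.range' (j + 1 * (m - j)) ((s.length + 1 - m)) 1
              = List.range' j ((m - j) + (s.length + 1 - m)) := List.range'_append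
          have e2 : j + 1 * (m - j) = m := by omega
          have e3 : (m - j) + (s.length + 1 - m) = s.length + 1 - j := by omega
          have e4 : s.length + 1 - m = (s.length - m) + 1 := by omega
          rw [e2, e3] at e1
          rw [← e1, e4, List.range'_succ]
        have hfil1 : (List.range' j (m - j)).filter (fun i => decide (p <+: s.drop i)) = [] := by
          rw [List.filter_eq_nil_iff]
          intro i hi
          simp only [decide_eq_true_eq]
          have := List.mem_range'_1.mp hi
          exact hmin i this.1 (by omega)
        have hstep : pvLoopA s p (fuel + 1) r
            = [r, r + (p.length : Int)] :: pvLoopA s p fuel (PySem.Chars.findFrom s p (r + 1) none) := by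
          simp [pvLoopA, hr0]
        rw [hstep, hnext, hrec]
        simp only [pvOcc, hsplit, List.filter_append, hfil1, List.nil_append, List.filter_cons,
          decide_eq_true_eq, hpre, if_pos]
        rw [hrm]
        have e5 : s.length + 1 - (m + 1) = s.length - m := by omega
        rw [e5]
        norm_num
      -- done?
    · have h2 : PySem.Chars.findFrom s p (j : Int) none = -1 := pvFindFrom_past s p j (by omega)
      have h0 : s.length + 1 - j = 0 := by omega
      rw [h2]
      simp [pvLoopA, pvOcc, h0]

theorem pvSwapPerm {α β γ : Type} (xs : List α) (ys : List β) (f : α → β → Option γ) :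
    (xs.flatMap fun a => ys.filterMap (f a)).Perm (ys.flatMap fun b => xs.filterMap (fun a => f a b)) := by
  induction xs with
  | nil => simp
  | cons x xs ih =>
    have h1 : (fun b => List.filterMap (fun a => f a b) (x :: xs))
        = fun b => (f x b).toList ++ xs.filterMap (fun a => f a b) := by
      funext b; cases h : f x b <;> simp [h]
    rw [List.flatMap_cons, h1]
    refine List.Perm.trans (List.Perm.append_left _ ih) ?_
    have h2 : List.filterMap (f x) ys = List.flatMap (fun b => (f x b).toList) ys :=
      List.filterMap_eq_flatMap_toList (f x) ys
    rw [h2]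
    exact List.flatMap_append_perm ys _ _

theorem pvFilterMapEq {α β : Type} (l : List α) (p : α → Bool) (f : α → β) :
    (l.filter p).map f = l.filterMap (fun x => if p x then some (f x) else none) := by
  induction l with
  | nil => rfl
  | cons x xs ih => by_cases h : p x <;> simp [h, ih]

theorem pvStartswith_eq (t q : List Char) : PySem.Chars.startswith t q = decide (q <+: t) := by
  by_cases h : q <+: t
  · simp [h, (PySem.Chars.startswith_iff t q).mpr h]
  · simp only [h, decide_false]
    cases hsw : PySem.Chars.startswith t q
    · rfl
    · exact absurd ((PySem.Chars.startswith_iff t q).mp hsw) h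

theorem pvOcc_zero (s p : List Char) :
    pvOcc s p 0 = (List.range (s.length + 1)).filterMap
      (fun k => if decide (p <+: s.drop k) = true then some [(k : Int), (k : Int) + (p.length : Int)] else none) := by
  unfold pvOcc
  rw [Nat.sub_zero, ← List.range_eq_range', pvFilterMapEq]

theorem pvA_eq (peptides : List String) (seq : String) :
    get_peptide_ranges peptides seq
      = PySem.List.sorted (peptides.flatMap fun pep =>
          (List.range (seq.toList.length + 1)).filterMap
            (fun k => if decide (pep.toList <+: seq.toList.drop k) = true
              then some [(k : Int), (k : Int) + (pep.toList.length : Int)] else none))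
          (fun x => x) false := by
  simp only [get_peptide_ranges]
  rw [PySem.List.foldl_append_eq_flatMap, List.nil_append]
  have hg : (fun upep : String => pvLoopA seq.toList upep.toList (seq.toList.length + 2)
        (PySem.Chars.find seq.toList upep.toList))
      = (fun pep : String => (List.range (seq.toList.length + 1)).filterMap
          (fun k => if decide (pep.toList <+: seq.toList.drop k) = true
            then some [(k : Int), (k : Int) + (pep.toList.length : Int)] else none)) := by
    funext pep
    rw [← pvOcc_zero]
    have h0 : PySem.Chars.find seq.toList pep.toList
        = PySem.Chars.findFrom seq.toList pep.toList ((0 : Nat) : Int) none := by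
      simp
    rw [h0]
    exact pvLoopA_eq seq.toList pep.toList (seq.toList.length + 2) 0 (by omega)
  rw [hg]

theorem pvB_eq (peptides : List String) (seq : String) :
    get_peptide_ranges_alt peptides seq
      = PySem.List.sorted ((List.range (seq.toList.length + 1)).flatMap fun k =>
          peptides.filterMap
            (fun pep => if decide (pep.toList <+: seq.toList.drop k) = true
              then some [(k : Int), (k : Int) + (pep.toList.length : Int)] else none))
          (fun x => x) false := by
  simp only [get_peptide_ranges_alt]
  rw [PySem.List.pyRange_one]
  have ht : (((seq.toList.length : Int) + 1) - 0).toNat = seq.toList.length + 1 := by omega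
  rw [ht, List.foldl_map]
  have hg : (fun (acc : List (List Int)) (k : Nat) =>
        List.foldl (fun acc2 pep =>
          if PySem.Chars.startswith (PySem.Chars.slice seq.toList (some ((0 : Int) + (k : Int))) none) pep.toList
          then acc2 ++ [[(0 : Int) + (k : Int), (0 : Int) + (k : Int) + (pep.toList.length : Int)]] else acc2) acc peptides)
      = (fun (acc : List (List Int)) (k : Nat) => acc ++
          peptides.filterMap
            (fun pep => if decide (pep.toList <+: seq.toList.drop k) = true
              then some [(k : Int), (k : Int) + (pep.toList.length : Int)] else none)) := by
    funext acc k
    have hsuf : PySem.Chars.slice seq.toList (some ((0 : Int) + (k : Int))) none = seq.toList.drop k := by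
      rw [zero_add, PySem.Chars.slice_eq_listSlice, PySem.List.slice_from _ (by omega : (0:Int) ≤ ((k:Nat):Int))]
      simp
    rw [hsuf]
    simp only [zero_add]
    rw [PySem.List.foldl_append_if (fun pep : String => PySem.Chars.startswith (seq.toList.drop k) pep.toList)
      (fun pep : String => [(k : Int), (k : Int) + (pep.toList.length : Int)]) peptides acc]
    congr 1
    rw [pvFilterMapEq]
    congr 1
    funext pep
    rw [pvStartswith_eq]
  rw [hg, PySem.List.foldl_append_eq_flatMap, List.nil_append]

-- ===== VERDICT (by name: the statement is the Claim_ definition above) =====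
theorem get_peptide_ranges_spec : Claim_equal_get_peptide_ranges := by
  unfold Claim_equal_get_peptide_ranges
  intro peptides seq _
  unfold Spec_get_peptide_ranges
  rw [pvA_eq, pvB_eq]
  have hperm := pvSwapPerm peptides (List.range (seq.toList.length + 1))
    (fun pep k => if decide (pep.toList <+: seq.toList.drop k) = true
      then some [(k : Int), (k : Int) + (pep.toList.length : Int)] else none)
  have h := (PySem.List.sorted_id_eq_sorted_id_iff_perm _ _).mpr hperm
  convert h using 2
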